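-- pv_equiv track=rewrite | github.com/EnriqueOrtiz27/datamex1019 | module-1/pandas-project/your-code/clean_columns.py | clean_first_column
-- ===== SOURCE A (Python) =====
-- def clean_first_column(s):
-- 	""" Esta función limpia la primer columna y la deja lista para ser convertida en formato de fecha."""
--
-- 	abc = ['a', 'b', 'c', 'd', 'e', 'f', 'g', 'h', 'i', 'j', 'k', 'l', 'm', 'n', 'o', 'p', 'q', 'r', 's', 't',
--       'u', 'v', 'x', 'y', 'z']
--
-- 	ABC = [x.upper() for x in abc]
--
-- 	s = s.replace(".", "/")
-- 	s = s.replace("/", '')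
--
-- 	for letter in abc:
-- 		s = s.replace(letter, "")
--
-- 	for letter in ABC:
-- 		s = s.replace(letter, "")
--
-- 	return s
-- ===== SOURCE B (Python) =====
-- # B: one pass over s with a precomputed removal set, instead of A's 52 full-string .replace passes; simpler.
-- REMOVE = set("abcdefghijklmnopqrstuvxyz" "ABCDEFGHIJKLMNOPQRSTUVXYZ" "./")
--
--
-- def clean_first_column(s):
--     """ Esta función limpia la primer columna y la deja lista para ser convertida en formato de fecha."""
--     return ''.join(c for c in s if c not in REMOVE)
-- ===== Notes on version B (the rewrite author's own statement) =====
-- stated objective: simpler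
-- what changed: Replaces the chain of 52 full-string .replace() passes (including the '.'->'/'->'' two-step) with a single pass that keeps exactly the characters outside a precomputed removal set (all letters except w/W, plus '.' and '/').
import Mathlib
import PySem

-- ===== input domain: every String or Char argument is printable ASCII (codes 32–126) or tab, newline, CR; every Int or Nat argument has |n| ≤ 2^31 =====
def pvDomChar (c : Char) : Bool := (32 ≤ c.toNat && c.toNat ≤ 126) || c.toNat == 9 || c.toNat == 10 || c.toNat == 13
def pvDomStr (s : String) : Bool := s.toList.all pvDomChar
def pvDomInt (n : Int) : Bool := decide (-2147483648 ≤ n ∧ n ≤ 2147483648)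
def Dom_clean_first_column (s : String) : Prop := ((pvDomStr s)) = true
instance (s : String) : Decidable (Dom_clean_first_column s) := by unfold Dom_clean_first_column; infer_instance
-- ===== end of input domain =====

-- B replaces A's chain of 52 full-string single-char replace passes by one pass keeping the
-- characters outside a precomputed removal set (all letters except w/W, plus '.' and '/'); simpler.


-- ===== PORT A =====
def clean_first_column (s : String) : String :=
  let abc : List String := ["a","b","c","d","e","f","g","h","i","j","k","l","m","n","o","p","q","r","s","t","u","v","x","y","z"]
  let ABC : List String := abc.map (fun x => PySem.Str.upper x)
  let s1 := PySem.Str.replace s "." "/"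
  let s2 := PySem.Str.replace s1 "/" ""
  let s3 := abc.foldl (fun t letter => PySem.Str.replace t letter "") s2
  ABC.foldl (fun t letter => PySem.Str.replace t letter "") s3

-- ===== PORT B =====
-- the module-level removal set REMOVE of Source B
def pvRemoveSet : PySem.Set Char :=
  PySem.Set.ofList ("abcdefghijklmnopqrstuvxyz" ++ "ABCDEFGHIJKLMNOPQRSTUVXYZ" ++ "./").toList

def clean_first_column_alt (s : String) : String :=
  String.ofList (s.toList.filter (fun c => !(PySem.Set.contains pvRemoveSet c)))

-- ===== PRECONDITION & SPEC =====
def Spec_clean_first_column (s : String) (out : String) : Prop := out = clean_first_column_alt s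
instance (s : String) (out : String) : Decidable (Spec_clean_first_column s out) := by unfold Spec_clean_first_column; infer_instance

-- ===== CLAIM (what is proved, stated in full; the proofs are below) =====
def Claim_equal_clean_first_column : Prop := ∀ (s : String), Dom_clean_first_column s → Spec_clean_first_column s (clean_first_column s)

-- ===== LEMMAS AND PROOFS =====

-- s.replace(c, '') with a one-character pattern is a filter
theorem pv_go_del (c : Char) : ∀ (fuel : Nat) (l acc : List Char), l.length ≤ fuel →
    PySem.Chars.replace.go [c] [] fuel l acc = acc.reverse ++ l.filter (· ≠ c) := by
  intro fuel
  induction fuel with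
  | zero =>
    intro l acc h
    have : l = [] := List.eq_nil_of_length_eq_zero (Nat.le_zero.mp h)
    subst this; simp [PySem.Chars.replace.go]
  | succ n ih =>
    intro l acc h
    cases l with
    | nil => simp [PySem.Chars.replace.go]
    | cons x t =>
      simp only [PySem.Chars.replace.go]
      by_cases hx : x = c
      · subst hx
        simp [List.isPrefixOf, ih t _ (by simpa using h)]
      · have hpre : ¬ ([c].isPrefixOf (x :: t) = true) := by
          simp [List.isPrefixOf]; exact fun h2 => hx h2.symm
        simp only [hpre, ih t _ (by simpa using h)]
        simp [hx]

theorem pv_replace_del (l : List Char) (c : Char) :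
    PySem.Chars.replace l [c] [] = l.filter (· ≠ c) := by
  simp [PySem.Chars.replace, pv_go_del c l.length l [] le_rfl]

-- s.replace(c, d) with one-character pattern and replacement is a map
theorem pv_go_sub (c d : Char) : ∀ (fuel : Nat) (l acc : List Char), l.length ≤ fuel →
    PySem.Chars.replace.go [c] [d] fuel l acc = acc.reverse ++ l.map (fun x => if x = c then d else x) := by
  intro fuel
  induction fuel with
  | zero =>
    intro l acc h
    have : l = [] := List.eq_nil_of_length_eq_zero (Nat.le_zero.mp h)
    subst this; simp [PySem.Chars.replace.go]
  | succ n ih =>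
    intro l acc h
    cases l with
    | nil => simp [PySem.Chars.replace.go]
    | cons x t =>
      simp only [PySem.Chars.replace.go]
      by_cases hx : x = c
      · subst hx
        simp [List.isPrefixOf, ih t _ (by simpa using h)]
      · have hpre : ¬ ([c].isPrefixOf (x :: t) = true) := by
          simp [List.isPrefixOf]; exact fun h2 => hx h2.symm
        simp only [hpre, ih t _ (by simpa using h)]
        simp [hx]

theorem pv_replace_sub (l : List Char) (c d : Char) :
    PySem.Chars.replace l [c] [d] = l.map (fun x => if x = c then d else x) := by
  simp [PySem.Chars.replace, pv_go_sub c d l.length l [] le_rfl]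

-- filtering after a map that is the identity on the kept characters
theorem pv_filter_map_id (f : Char → Char) (p q : Char → Bool) (l : List Char)
    (h1 : ∀ x, p (f x) = q x) (h2 : ∀ x, q x = true → f x = x) :
    List.filter p (List.map f l) = List.filter q l := by
  induction l with
  | nil => rfl
  | cons x t ih =>
    simp only [List.map_cons, List.filter_cons, h1 x]
    by_cases hq : q x = true
    · simp [hq, h2 x hq, ih]
    · simp [hq, ih]

set_option maxRecDepth 100000 in
theorem pv_main (s : String) : clean_first_column s = clean_first_column_alt s := by
  apply String.toList_inj.mp
  unfold clean_first_column clean_first_column_alt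
  dsimp only
  rw [show List.map (fun x => PySem.Str.upper x)
        ["a","b","c","d","e","f","g","h","i","j","k","l","m","n","o","p","q","r","s","t","u","v","x","y","z"]
      = ["A","B","C","D","E","F","G","H","I","J","K","L","M","N","O","P","Q","R","S","T","U","V","X","Y","Z"] from rfl]
  simp only [List.foldl, PySem.Str.toList_replace]
  simp [pv_replace_del, pv_replace_sub]
  apply pv_filter_map_id
  · intro c
    by_cases hc : c = '.'
    · subst hc; decide
    · simp only [if_neg hc]
      rw [show pvRemoveSet = ("abcdefghijklmnopqrstuvxyzABCDEFGHIJKLMNOPQRSTUVXYZ./" : String).toList from rfl]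
      rw [Bool.eq_iff_iff]
      simp [PySem.Set.contains, List.contains, hc]
      constructor <;> (intro h; simp_all)
  · intro c hq
    rw [show pvRemoveSet = ("abcdefghijklmnopqrstuvxyzABCDEFGHIJKLMNOPQRSTUVXYZ./" : String).toList from rfl] at hq
    simp at hq
    simp [hq.2.2]

-- ===== VERDICT (by name: the statement is the Claim_ definition above) =====
theorem clean_first_column_spec : Claim_equal_clean_first_column := by
  intro s _
  unfold Spec_clean_first_column
  exact pv_main s
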